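-- pv_equiv track=rewrite | github.com/den2704/on-line-net | KZ_30d.py | job_name_m
-- ===== SOURCE A (Python) =====
-- def job_name_m(name):
--     second = 0
--     job_name = ''
--     if str(name) == 'None':
--         return
--     for char in str(name):
--         if char == '\\':
--             second += 1
--             continue
--         if char == '.':
--             break
--         if second == 2:
--             job_name += char
--     return job_name
-- ===== SOURCE B (Python) =====
-- def job_name_m(name):
--     s = str(name)
--     if s == 'None':
--         return None
--     prefix = s.split('.', 1)[0]
--     parts = prefix.split('\\')
--     return parts[2] if len(parts) >= 3 else ''
-- ===== Notes on version B (the rewrite author's own statement) =====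
-- stated objective: simpler
-- what changed: Replaces A's character-by-character scan with a backslash counter, continue and break by a split-and-index decomposition: cut the string at the first dot, split the prefix on backslashes, and return segment 2 (or '' if fewer than three segments). (same O(n) but the work moves into C-level str.split calls)
import Mathlib
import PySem

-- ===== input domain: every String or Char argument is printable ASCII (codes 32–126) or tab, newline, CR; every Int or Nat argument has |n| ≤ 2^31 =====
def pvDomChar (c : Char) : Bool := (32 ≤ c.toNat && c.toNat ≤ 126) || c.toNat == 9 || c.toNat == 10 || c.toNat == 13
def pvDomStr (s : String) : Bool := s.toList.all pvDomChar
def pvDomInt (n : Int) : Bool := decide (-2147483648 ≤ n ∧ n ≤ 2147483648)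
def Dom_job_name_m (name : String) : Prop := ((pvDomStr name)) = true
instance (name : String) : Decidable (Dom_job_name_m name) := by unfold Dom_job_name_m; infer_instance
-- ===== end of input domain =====

-- B replaces A's counter/break character scan by a split-and-index decomposition (cut at the
-- first dot, split on backslashes, take segment 2 or ''); objective: simpler.

-- ===== PORT A =====
-- A's for-loop with the `second` counter, `continue` and `break`, and the job_name accumulator.
def jnLoopA : List Char → Int → List Char → List Char
  | [], _, acc => acc
  | c :: rest, second, acc =>
    if c = '\\' then jnLoopA rest (second + 1) acc
    else if c = '.' then acc
    else if second = 2 then jnLoopA rest second (acc ++ [c])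
    else jnLoopA rest second acc

def job_name_m (name : String) : Option String :=
  if name = "None" then none
  else some (String.ofList (jnLoopA name.toList 0 []))

-- ===== PORT B =====
def job_name_m_alt (name : String) : Option String :=
  if name = "None" then none
  else
    let pfx := (PySem.Chars.splitOnMax name.toList ['.'] 1).headD []   -- s.split('.', 1)[0]
    let parts := PySem.Chars.splitOn pfx ['\\']                        -- prefix.split('\\')
    some (String.ofList (if 3 ≤ parts.length then parts.getD 2 [] else []))

-- ===== PRECONDITION & SPEC =====
def Spec_job_name_m (name : String) (out : Option String) : Prop := out = job_name_m_alt name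
instance (name : String) (out : Option String) : Decidable (Spec_job_name_m name out) := by unfold Spec_job_name_m; infer_instance

-- ===== CLAIM (what is proved, stated in full; the proofs are below) =====
def Claim_equal_job_name_m : Prop := ∀ (name : String), Dom_job_name_m name → Spec_job_name_m name (job_name_m name)

-- ===== LEMMAS AND PROOFS =====

-- Reference function: split a character list on a single separator character.
def segsC (c0 : Char) : List Char → List (List Char)
  | [] => [[]]
  | c :: rest =>
    if c = c0 then [] :: segsC c0 rest
    else (c :: (segsC c0 rest).headD []) :: (segsC c0 rest).tail

theorem segsC_ne_nil (c0 : Char) (l : List Char) : segsC c0 l ≠ [] := by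
  cases l with
  | nil => simp [segsC]
  | cons c rest => simp only [segsC]; split <;> simp

-- A's loop ignores everything from the first dot on (the `break`).
theorem jnLoopA_takeWhile (l : List Char) (s : Int) (acc : List Char) :
    jnLoopA l s acc = jnLoopA (l.takeWhile (· ≠ '.')) s acc := by
  induction l generalizing s acc with
  | nil => rfl
  | cons c rest ih =>
    by_cases hdot : c = '.'
    · subst hdot; simp [jnLoopA]
    · have hd : (decide (c ≠ '.')) = true := by simp [hdot]
      rw [List.takeWhile_cons, hd, if_pos rfl]
      by_cases hbs : c = '\\'
      · subst hbs
        simp only [jnLoopA]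
        exact ih _ _
      · simp only [jnLoopA, if_neg hbs, if_neg hdot]
        split_ifs <;> exact ih _ _

-- On a dot-free list, A's loop appends segment (2 - k) of the backslash split (or nothing).
theorem jnLoopA_segs (l : List Char) (hl : ∀ c ∈ l, c ≠ '.') (k : Nat) (acc : List Char) :
    jnLoopA l (k : Int) acc =
      acc ++ (if k ≤ 2 then (segsC '\\' l).getD (2 - k) [] else []) := by
  induction l generalizing k acc with
  | nil =>
    simp only [jnLoopA, segsC]
    split_ifs with h
    · cases h2 : (2 - k) <;> simp [List.getD]
    · simp
  | cons c rest ih =>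
    have hc : c ≠ '.' := hl c (by simp)
    have hrest : ∀ x ∈ rest, x ≠ '.' := fun x hx => hl x (by simp [hx])
    by_cases hbs : c = '\\'
    · subst hbs
      have hcast : ((k : Int) + 1) = ((k + 1 : Nat) : Int) := by push_cast; ring
      simp only [jnLoopA, hcast, ih hrest, segsC]
      by_cases hk2 : k ≤ 2
      · by_cases hk1 : k + 1 ≤ 2
        · have h2 : 2 - k = (2 - (k + 1)) + 1 := by omega
          simp [hk1, hk2, h2]
        · have hk : k = 2 := by omega
          subst hk
          simp [hk1, List.getD]
      · have hk1 : ¬ k + 1 ≤ 2 := by omega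
        simp [hk1, hk2]
    · simp only [jnLoopA, if_neg hbs, if_neg hc]
      have hne := segsC_ne_nil '\\' rest
      by_cases hk : (k : Int) = 2
      · have hk' : k = 2 := by exact_mod_cast hk
        subst hk'
        rw [if_pos hk, ih hrest 2 (acc ++ [c])]
        simp only [segsC, if_neg hbs, Nat.sub_self, le_refl, if_pos]
        cases hsr : segsC '\\' rest with
        | nil => exact absurd hsr hne
        | cons a tl => simp [List.getD]
      · have hk' : k ≠ 2 := fun h => hk (by exact_mod_cast h)
        rw [if_neg hk, ih hrest k acc]
        simp only [segsC, if_neg hbs]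
        by_cases hle : k ≤ 2
        · have hkk : k = 0 ∨ k = 1 := by omega
          rcases hkk with h | h <;> subst h <;>
            cases hsr : segsC '\\' rest with
            | nil => exact absurd hsr hne
            | cons a tl => simp [hle, List.getD]
        · simp [hle]

-- splitOn.go with a single-character separator computes segsC.
theorem splitOn_go_segsC (c0 : Char) (l cur : List Char) (acc : List (List Char)) (fuel : Nat)
    (h : l.length ≤ fuel) :
    PySem.Chars.splitOn.go [c0] fuel l cur acc =
      acc.reverse ++ (cur.reverse ++ (segsC c0 l).headD []) :: (segsC c0 l).tail := by
  induction l generalizing cur acc fuel with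
  | nil =>
    cases fuel <;> simp [PySem.Chars.splitOn.go, segsC]
  | cons c rest ih =>
    cases fuel with
    | zero => simp at h
    | succ f =>
      have hf : rest.length ≤ f := by simpa using h
      rw [PySem.Chars.splitOn.go]
      by_cases hc : c = c0
      · subst hc
        have hpre : List.isPrefixOf [c] (c :: rest) = true := by simp [List.isPrefixOf]
        rw [if_pos hpre]
        simp only [List.length_cons, List.length_nil, Nat.zero_add, List.drop_succ_cons, List.drop_zero]
        rw [ih [] (cur.reverse :: acc) f hf]
        have hne := segsC_ne_nil c rest
        cases hsr : segsC c rest with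
        | nil => exact absurd hsr hne
        | cons a tl => simp [segsC, hsr]
      · have hpre : List.isPrefixOf [c0] (c :: rest) = false := by
          simp [List.isPrefixOf]; exact fun h => absurd h.symm hc
        rw [if_neg (by simp [hpre])]
        rw [ih (c :: cur) acc f hf]
        simp [segsC, hc, List.append_assoc]

theorem splitOn_segsC (c0 : Char) (l : List Char) :
    PySem.Chars.splitOn l [c0] = segsC c0 l := by
  unfold PySem.Chars.splitOn
  rw [splitOn_go_segsC c0 l [] [] (l.length + 1) (by omega)]
  have hne := segsC_ne_nil c0 l
  cases h : segsC c0 l with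
  | nil => exact absurd h hne
  | cons a tl => simp

-- splitOnMax.go with maxsplit 0 returns immediately.
theorem splitOnMax_go_zero (sep : List Char) (fuel : Nat) (l cur : List Char)
    (acc : List (List Char)) :
    PySem.Chars.splitOnMax.go sep fuel 0 l cur acc = ((cur.reverse ++ l) :: acc).reverse := by
  cases fuel with
  | zero => rfl
  | succ f => cases l <;> simp [PySem.Chars.splitOnMax.go]

-- splitOnMax.go with maxsplit 1 and a single-char separator: the piece before the first
-- separator, and — if a separator occurs — the remainder after it.
theorem splitOnMax_go_one (c0 : Char) (l cur : List Char) (acc : List (List Char)) (fuel : Nat)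
    (h : l.length ≤ fuel) :
    PySem.Chars.splitOnMax.go [c0] fuel 1 l cur acc =
      acc.reverse ++
        (if c0 ∈ l then [cur.reverse ++ l.takeWhile (· ≠ c0), (l.dropWhile (· ≠ c0)).tail]
         else [cur.reverse ++ l]) := by
  induction l generalizing cur acc fuel with
  | nil =>
    cases fuel <;> simp [PySem.Chars.splitOnMax.go]
  | cons c rest ih =>
    cases fuel with
    | zero => simp at h
    | succ f =>
      have hf : rest.length ≤ f := by simpa using h
      rw [PySem.Chars.splitOnMax.go]
      by_cases hc : c = c0
      · subst hc
        have hpre : List.isPrefixOf [c] (c :: rest) = true := by simp [List.isPrefixOf]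
        rw [if_neg (by norm_num), if_pos hpre]
        simp only [List.length_cons, List.length_nil, Nat.zero_add, List.drop_succ_cons,
          List.drop_zero]
        rw [splitOnMax_go_zero]
        simp
      · have hpre : List.isPrefixOf [c0] (c :: rest) = false := by
          simp [List.isPrefixOf]; exact fun h => absurd h.symm hc
        rw [if_neg (by norm_num), if_neg (by simp [hpre])]
        rw [ih (c :: cur) acc f hf]
        have hd : (decide (c ≠ c0)) = true := by simp [hc]
        have hmem : (c0 ∈ c :: rest) ↔ (c0 ∈ rest) := by
          simp [List.mem_cons]; exact fun h => absurd h.symm hc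
        by_cases hm : c0 ∈ rest <;>
          simp [hm, hmem, hc, List.append_assoc]

-- The first piece of s.split('.', 1) is the chars before the first dot.
theorem splitOnMax_headD (l : List Char) :
    (PySem.Chars.splitOnMax l ['.'] 1).headD [] = l.takeWhile (· ≠ '.') := by
  unfold PySem.Chars.splitOnMax
  rw [if_neg (by norm_num)]
  rw [show (1 : Int).toNat = 1 from rfl]
  rw [splitOnMax_go_one '.' l [] [] (l.length + 1) (by omega)]
  by_cases hm : '.' ∈ l
  · simp [hm]
  · simp only [hm, List.reverse_nil, List.nil_append, List.headD_cons, if_false]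
    rw [List.takeWhile_eq_self_iff.mpr]
    intro c hc
    simp only [ne_eq, decide_eq_true_eq]
    intro h
    exact hm (h ▸ hc)

-- getD 2 already yields [] when there are fewer than 3 parts, so B's guard is redundant.
theorem getD_guard (parts : List (List Char)) :
    (if 3 ≤ parts.length then parts.getD 2 [] else []) = parts.getD 2 [] := by
  split
  · rfl
  · rw [List.getD_eq_getElem?_getD, List.getElem?_eq_none (by omega)]
    rfl

-- ===== VERDICT (by name: the statement is the Claim_ definition above) =====
theorem job_name_m_spec : Claim_equal_job_name_m := by
  intro name _
  unfold Spec_job_name_m job_name_m job_name_m_alt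
  by_cases hN : name = "None"
  · simp [hN]
  · simp only [hN, if_false]
    rw [splitOnMax_headD, splitOn_segsC, getD_guard]
    rw [jnLoopA_takeWhile, show (0 : Int) = ((0 : Nat) : Int) from rfl,
      jnLoopA_segs _ (fun c hc => by
        have := List.mem_takeWhile_imp hc
        simpa using this) 0 []]
    simp
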